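-- pv_equiv track=rewrite | github.com/youaresherlock/PythonPractice | Foundation/algorithms/可获得的最大点数.py | max_point
-- ===== SOURCE A (Python) =====
-- from typing import List
--
-- def max_point(points: List[int], k: int) -> int:
--     max_index, max_sum = k, 0
--     for i in range(max_index + 1):
--         another_index = max_index - i
--         left_list = points[:i]
--         right_list = points[-another_index:] if another_index > 0 else []
--         sum_points = sum(left_list + right_list)
--         if max_sum < sum_points:
--             max_sum = sum_points
--
--     return max_sum
-- ===== SOURCE B (Python) =====
-- from typing import List
--
-- def max_point(points: List[int], k: int) -> int:
--     n = len(points)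
--     prefix = [0]
--     for x in points:
--         prefix.append(prefix[-1] + x)
--     best = 0
--     for i in range(k + 1):
--         r = k - i
--         left = prefix[min(i, n)]
--         right = prefix[n] - prefix[max(0, n - r)] if r > 0 else 0
--         s = left + right
--         if s > best:
--             best = s
--     return best
-- ===== Notes on version B (the rewrite author's own statement) =====
-- stated objective: faster
-- what changed: B precomputes one prefix-sum table and reads each split's left/right sum from it in O(1), instead of A's slicing, concatenating and re-summing the two ends for every split point.
import Mathlib
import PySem

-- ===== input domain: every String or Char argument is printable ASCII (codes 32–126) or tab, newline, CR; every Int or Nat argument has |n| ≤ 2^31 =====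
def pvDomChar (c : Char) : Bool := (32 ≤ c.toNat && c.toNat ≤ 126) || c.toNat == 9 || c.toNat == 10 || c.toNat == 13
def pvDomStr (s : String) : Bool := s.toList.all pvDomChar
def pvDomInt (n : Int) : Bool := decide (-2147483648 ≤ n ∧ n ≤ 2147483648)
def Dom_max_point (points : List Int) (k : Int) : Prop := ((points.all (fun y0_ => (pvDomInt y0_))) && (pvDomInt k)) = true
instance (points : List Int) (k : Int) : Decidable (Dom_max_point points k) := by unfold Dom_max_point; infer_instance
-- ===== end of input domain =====

-- B replaces A's per-split list slicing and re-summation with one precomputed pref-sum table, for an O(n+k) instead of O(k·n) computation of the same value.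

-- ===== PORT A =====
def max_point (points : List Int) (k : Int) : Int :=
  (PySem.List.pyRange 0 (k + 1) 1).foldl (fun max_sum i =>
    let another_index := k - i
    let left_list := PySem.List.slice points none (some i)
    let right_list := if another_index > 0 then PySem.List.slice points (some (-another_index)) none else []
    let sum_points := (left_list ++ right_list).sum
    if max_sum < sum_points then sum_points else max_sum) 0

-- ===== PORT B =====
def max_point_alt (points : List Int) (k : Int) : Int :=
  let n : Int := points.length
  let pref := points.foldl (fun p x => p ++ [p.getLast! + x]) [0]
  (PySem.List.pyRange 0 (k + 1) 1).foldl (fun best i =>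
    let r := k - i
    let left := PySem.List.pyGetD pref (min i n) 0
    let right := if r > 0 then PySem.List.pyGetD pref n 0 - PySem.List.pyGetD pref (max 0 (n - r)) 0 else 0
    let s := left + right
    if s > best then s else best) 0

-- ===== PRECONDITION & SPEC =====
def Spec_max_point (points : List Int) (k : Int) (out : Int) : Prop := out = max_point_alt points k
instance (points : List Int) (k : Int) (out : Int) : Decidable (Spec_max_point points k out) := by unfold Spec_max_point; infer_instance

-- ===== CLAIM (what is proved, stated in full; the proofs are below) =====
def Claim_equal_max_point : Prop := ∀ (points : List Int) (k : Int), Dom_max_point points k → Spec_max_point points k (max_point points k)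

-- ===== LEMMAS AND PROOFS =====

-- B's pref-building loop, from any nonempty accumulator.
theorem pv_prefix_aux (xs : List Int) : ∀ (acc : List Int), acc ≠ [] →
    xs.foldl (fun p x => p ++ [p.getLast! + x]) acc
      = acc ++ (List.range xs.length).map (fun j => acc.getLast! + (xs.take (j+1)).sum) := by
  induction xs with
  | nil => intro acc h; simp
  | cons x xs ih =>
    intro acc h
    rw [List.foldl_cons, ih (acc ++ [acc.getLast! + x]) (by simp)]
    have hl : (acc ++ [acc.getLast! + x]).getLast! = acc.getLast! + x := by simp
    rw [hl]
    simp only [List.length_cons, List.range_succ_eq_map, List.map_cons, List.map_map]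
    simp [Function.comp, List.take_succ_cons, add_assoc]

-- B's pref list is the table of pref sums of points.
theorem pv_prefix_eq (xs : List Int) :
    xs.foldl (fun p x => p ++ [p.getLast! + x]) [(0 : Int)]
      = (List.range (xs.length + 1)).map (fun j => (xs.take j).sum) := by
  rw [pv_prefix_aux xs [0] (by simp)]
  simp [List.range_succ_eq_map, List.map_map, Function.comp]

theorem pv_prefix_getD (xs : List Int) (t : Nat) (ht : t ≤ xs.length) :
    ((List.range (xs.length + 1)).map (fun j => (xs.take j).sum)).getD t 0 = (xs.take t).sum := by
  have h : t < xs.length + 1 := by omega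
  simp [List.getD_eq_getElem?_getD, h]

-- ===== VERDICT (by name: the statement is the Claim_ definition above) =====
theorem max_point_spec : Claim_equal_max_point := by
  intro points k _
  unfold Spec_max_point max_point max_point_alt
  rw [pv_prefix_eq]
  apply PySem.List.foldl_congr_mem
  intro acc i hmem
  rw [PySem.List.mem_pyRange_one] at hmem
  obtain ⟨hi0, hik⟩ := hmem
  simp only []
  have hB : ∀ t : Int, 0 ≤ t → t ≤ (points.length : Int) →
      PySem.List.pyGetD ((List.range (points.length + 1)).map (fun j => (points.take j).sum)) t 0
        = (points.take t.toNat).sum := by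
    intro t h0 h1
    rw [PySem.List.pyGetD_of_nonneg _ _ h0, pv_prefix_getD _ _ (by omega)]
  have hleft : (PySem.List.slice points none (some i)).sum
      = PySem.List.pyGetD ((List.range (points.length + 1)).map (fun j => (points.take j).sum)) (min i (points.length : Int)) 0 := by
    rw [PySem.List.slice_to points hi0, hB _ (le_min hi0 (Int.natCast_nonneg _)) (min_le_right _ _)]
    by_cases hin : i ≤ (points.length : Int)
    · rw [min_eq_left hin]
    · rw [List.take_of_length_le (by omega), List.take_of_length_le (by omega)]
  have hright : (if k - i > 0 then PySem.List.slice points (some (-(k - i))) none else []).sum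
      = (if k - i > 0 then
          PySem.List.pyGetD ((List.range (points.length + 1)).map (fun j => (points.take j).sum)) ((points.length : Nat) : Int) 0
            - PySem.List.pyGetD ((List.range (points.length + 1)).map (fun j => (points.take j).sum)) (max 0 (((points.length : Nat) : Int) - (k - i))) 0
         else 0) := by
    by_cases hr : k - i > 0
    · simp only [if_pos hr]
      have h1 : (k - i) = (((k - i).toNat : Nat) : Int) := by omega
      rw [h1, PySem.List.slice_from_neg_natCast points (k - i).toNat (by omega)]
      rw [hB _ (Int.natCast_nonneg _) (le_refl _), hB _ (le_max_left _ _) (by omega)]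
      have h2 : (max 0 (((points.length : Nat) : Int) - ((((k - i).toNat : Nat) : Int)))).toNat = points.length - (k - i).toNat := by omega
      rw [h2, Int.toNat_natCast, List.take_length]
      have h3 := List.sum_take_add_sum_drop points (points.length - (k - i).toNat)
      omega
    · simp only [if_neg hr]
      simp
  simp only [List.sum_append, hleft, hright, gt_iff_lt]
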